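-- pv_equiv track=rewrite | github.com/18895377293/Aut_Sci_Write | skills/sci-figure/src/subfigure_splitter.py | _cluster_splits
-- ===== SOURCE A (Python) =====
-- def _cluster_splits(
--     bands: list, min_distance: int
-- ) -> list:
--     """
--     Cluster nearby split bands into single split lines.
--
--     Bands within min_distance of each other are merged.
--     The strongest band (longest white gap) in each cluster wins.
--
--     Returns:
--         list of split positions (midpoints)
--     """
--     if not bands:
--         return []
--
--     # Sort by position
--     sorted_bands = sorted(bands, key=lambda b: b[0])
--
--     clusters = [[sorted_bands[0]]]
--     for band in sorted_bands[1:]: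
--         if band[0] - clusters[-1][-1][0] <= min_distance:
--             clusters[-1].append(band)
--         else:
--             clusters.append([band])
--
--     # For each cluster, pick the band with the longest white gap
--     result = []
--     for cluster in clusters:
--         best = max(cluster, key=lambda b: b[1])
--         result.append(best[0])
--
--     return result
-- ===== SOURCE B (Python) =====
-- def _cluster_splits(
--     bands: list, min_distance: int
-- ) -> list:
--     """One streaming pass: no clusters list-of-lists, no second max pass."""
--     if not bands:
--         return []
--     sorted_bands = sorted(bands, key=lambda b: b[0])
--     result = []
--     best = sorted_bands[0]
--     prev_pos = best[0]
--     for band in sorted_bands[1:]: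
--         if band[0] - prev_pos <= min_distance:
--             if band[1] > best[1]:
--                 best = band
--         else:
--             result.append(best[0])
--             best = band
--         prev_pos = band[0]
--     result.append(best[0])
--     return result
-- ===== Notes on version B (the rewrite author's own statement) =====
-- stated objective: simpler
-- what changed: Replaced A's two-phase design (build an explicit clusters list-of-lists, then a second pass taking max per cluster) by a single streaming pass after sorting that keeps only the previous position and the current cluster's best band, appending best[0] at each cluster break.
import Mathlib
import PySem

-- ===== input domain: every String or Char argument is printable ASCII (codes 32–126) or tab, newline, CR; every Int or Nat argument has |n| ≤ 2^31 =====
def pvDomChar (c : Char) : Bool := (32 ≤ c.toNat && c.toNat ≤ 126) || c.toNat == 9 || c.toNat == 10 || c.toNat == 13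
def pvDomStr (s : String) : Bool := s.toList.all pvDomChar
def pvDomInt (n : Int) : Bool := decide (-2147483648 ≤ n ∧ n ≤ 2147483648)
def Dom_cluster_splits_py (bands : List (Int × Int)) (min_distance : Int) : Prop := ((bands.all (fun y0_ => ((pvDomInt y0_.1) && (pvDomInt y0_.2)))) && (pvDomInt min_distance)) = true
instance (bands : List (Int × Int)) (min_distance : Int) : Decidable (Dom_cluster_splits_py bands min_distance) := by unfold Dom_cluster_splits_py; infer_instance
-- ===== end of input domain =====

-- B fuses the per-cluster max into one streaming pass (prev position + current best), dropping A's clusters list-of-lists and second pass; objective: simpler, same O(n log n) cost (return values proved equal; no observable mutation).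

-- ===== PORT A =====
-- Python's max(cluster, key=lambda b: b[1]) (first extremal element), ported by hand as its running fold
def pvMaxSnd (h : Int × Int) (t : List (Int × Int)) : Int × Int :=
  t.foldl (fun best y => if best.2 < y.2 then y else best) h

-- best[0] of a cluster; clusters are never empty in A, the [] default is unreachable
def pvPick (c : List (Int × Int)) : Int :=
  match c with
  | [] => 0
  | h :: t => (pvMaxSnd h t).1

-- A's clustering loop; clusters kept in reverse order, each cluster reversed (head = last appended band),
-- so that clusters[-1].append / clusters.append are head-conses
def pvStepA (md : Int) (rcs : List (List (Int × Int))) (b : Int × Int) : List (List (Int × Int)) :=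
  match rcs with
  | [] => [[b]]  -- unreachable: the accumulator starts nonempty
  | c :: rest =>
    if b.1 - (c.headD (0, 0)).1 ≤ md then (b :: c) :: rest
    else [b] :: c :: rest

def cluster_splits_py (bands : List (Int × Int)) (min_distance : Int) : List Int :=
  match PySem.List.sorted bands (fun b => b.1) with
  | [] => []
  | h :: t =>
    let rcs := t.foldl (pvStepA min_distance) [[h]]
    (rcs.reverse).map (fun c => pvPick c.reverse)

-- ===== PORT B =====
-- state: (result so far, prev_pos, best band of the current cluster)
def pvStepB (md : Int) (st : List Int × Int × (Int × Int)) (b : Int × Int) : List Int × Int × (Int × Int) :=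
  if b.1 - st.2.1 ≤ md then (st.1, b.1, if b.2 > st.2.2.2 then b else st.2.2)
  else (st.1 ++ [st.2.2.1], b.1, b)

def cluster_splits_py_alt (bands : List (Int × Int)) (min_distance : Int) : List Int :=
  match PySem.List.sorted bands (fun b => b.1) with
  | [] => []
  | h :: t =>
    let st := t.foldl (pvStepB min_distance) ([], h.1, h)
    st.1 ++ [st.2.2.1]

-- ===== PRECONDITION & SPEC =====
def Spec_cluster_splits_py (bands : List (Int × Int)) (min_distance : Int) (out : List Int) : Prop := out = cluster_splits_py_alt bands min_distance
instance (bands : List (Int × Int)) (min_distance : Int) (out : List Int) : Decidable (Spec_cluster_splits_py bands min_distance out) := by unfold Spec_cluster_splits_py; infer_instance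

-- ===== CLAIM (what is proved, stated in full; the proofs are below) =====
def Claim_equal_cluster_splits_py : Prop := ∀ (bands : List (Int × Int)) (min_distance : Int), Dom_cluster_splits_py bands min_distance → Spec_cluster_splits_py bands min_distance (cluster_splits_py bands min_distance)

-- ===== LEMMAS AND PROOFS =====

-- first-extremal max of a cluster stored in reverse (head = last band)
def bestR (rc : List (Int × Int)) : Int × Int :=
  match rc.reverse with
  | [] => (0, 0)
  | h :: t => pvMaxSnd h t

lemma pick_eq_bestR (rc : List (Int × Int)) (h : rc ≠ []) :
    pvPick rc.reverse = (bestR rc).1 := by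
  unfold pvPick bestR
  cases hrev : rc.reverse with
  | nil => exact absurd (List.reverse_eq_nil_iff.mp hrev) h
  | cons a t => rfl

lemma bestR_cons (b : Int × Int) (rc : List (Int × Int)) (h : rc ≠ []) :
    bestR (b :: rc) = if b.2 > (bestR rc).2 then b else bestR rc := by
  unfold bestR
  cases hrev : rc.reverse with
  | nil => exact absurd (List.reverse_eq_nil_iff.mp hrev) h
  | cons a t =>
    simp only [List.reverse_cons, hrev]
    show pvMaxSnd a (t ++ [b]) = _
    unfold pvMaxSnd
    rw [List.foldl_append]
    simp only [List.foldl_cons, List.foldl_nil, gt_iff_lt]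

lemma loop_eq (md : Int) :
    ∀ (t : List (Int × Int)) (rc : List (Int × Int)) (rest : List (List (Int × Int))) (acc : List Int),
      rc ≠ [] →
      acc = ((rest.map (fun c => pvPick c.reverse)).reverse) →
      ((t.foldl (pvStepA md) (rc :: rest)).reverse.map (fun c => pvPick c.reverse))
        = (fun st : List Int × Int × (Int × Int) => st.1 ++ [st.2.2.1])
            (t.foldl (pvStepB md) (acc, (rc.headD (0, 0)).1, bestR rc)) := by
  intro t
  induction t with
  | nil =>
    intro rc rest acc hrc hacc
    simp only [List.foldl_nil, List.reverse_cons, List.map_append, List.map_cons, List.map_nil]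
    rw [pick_eq_bestR rc hrc, hacc, List.map_reverse]
  | cons b t ih =>
    intro rc rest acc hrc hacc
    simp only [List.foldl_cons]
    obtain ⟨x, xs, rfl⟩ := List.exists_cons_of_ne_nil hrc
    by_cases hcond : b.1 - x.1 ≤ md
    · have hA : pvStepA md ((x :: xs) :: rest) b = (b :: x :: xs) :: rest := by
        simp only [pvStepA, List.headD_cons, if_pos hcond]
      have hB : pvStepB md (acc, ((x :: xs).headD (0, 0)).1, bestR (x :: xs)) b
          = (acc, b.1, if b.2 > (bestR (x :: xs)).2 then b else bestR (x :: xs)) := by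
        simp only [pvStepB, List.headD_cons]
        rw [if_pos hcond]
      rw [hA, hB, ← bestR_cons b (x :: xs) (by simp)]
      exact ih (b :: x :: xs) rest acc (by simp) hacc
    · have hA : pvStepA md ((x :: xs) :: rest) b = [b] :: (x :: xs) :: rest := by
        simp only [pvStepA, List.headD_cons, if_neg hcond]
      have hB : pvStepB md (acc, ((x :: xs).headD (0, 0)).1, bestR (x :: xs)) b
          = (acc ++ [(bestR (x :: xs)).1], b.1, b) := by
        simp only [pvStepB, List.headD_cons]
        rw [if_neg hcond]
      rw [hA, hB]
      have hbest : bestR [b] = b := by simp [bestR, pvMaxSnd]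
      have := ih [b] ((x :: xs) :: rest) (acc ++ [(bestR (x :: xs)).1])
        (by simp)
        (by rw [List.map_cons, List.reverse_cons, ← hacc, pick_eq_bestR (x :: xs) (by simp)])
      simpa [hbest] using this

-- ===== VERDICT (by name: the statement is the Claim_ definition above) =====
theorem cluster_splits_py_spec : Claim_equal_cluster_splits_py := by
  intro bands md _
  unfold Spec_cluster_splits_py cluster_splits_py cluster_splits_py_alt
  cases hs : PySem.List.sorted bands (fun b => b.1) with
  | nil => rfl
  | cons h t =>
    have := loop_eq md t [h] [] [] (by simp) (by simp)
    simpa [bestR, pvMaxSnd] using this
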